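-- pv_equiv track=rewrite | github.com/amarnp85/vectorbt | examples/07_advanced_mtf_strategy.py | count_signal_clusters
-- ===== SOURCE A (Python) =====
-- def count_signal_clusters(signals):
--     """Count consecutive signal clusters."""
--     try:
--         clusters = 0
--         in_cluster = False
--
--         for signal in signals:
--             if signal and not in_cluster:
--                 clusters += 1
--                 in_cluster = True
--             elif not signal:
--                 in_cluster = False
--
--         return clusters
--     except:
--         return 0
-- ===== SOURCE B (Python) =====
-- from itertools import groupby
--
--
-- def count_signal_clusters(signals):
--     """Count consecutive signal clusters."""
--     try:
--         return sum(1 for key, _ in groupby(bool(s) for s in signals) if key)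
--     except:
--         return 0
-- ===== Notes on version B (the rewrite author's own statement) =====
-- stated objective: idiomatic
-- what changed: Replaces the manual in_cluster flag-tracking loop with itertools.groupby: group consecutive equal truth values and count the groups whose key is truthy.
import Mathlib
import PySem

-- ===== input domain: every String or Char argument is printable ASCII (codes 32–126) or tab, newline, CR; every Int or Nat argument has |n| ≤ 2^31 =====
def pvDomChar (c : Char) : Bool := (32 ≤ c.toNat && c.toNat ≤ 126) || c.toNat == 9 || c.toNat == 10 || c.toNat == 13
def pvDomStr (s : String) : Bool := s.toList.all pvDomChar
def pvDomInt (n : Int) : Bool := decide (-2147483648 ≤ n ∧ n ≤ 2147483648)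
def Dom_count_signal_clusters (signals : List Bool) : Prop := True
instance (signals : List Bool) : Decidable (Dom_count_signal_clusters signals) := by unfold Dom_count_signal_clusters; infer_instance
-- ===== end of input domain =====

-- B replaces A's in_cluster flag-tracking loop with a groupby decomposition
-- (group consecutive equal truth values, count the truthy groups); same cost, more idiomatic.

-- ===== PORT A =====
-- A: fold over signals carrying (clusters, in_cluster); the try/except never fires on a List Bool.
def count_signal_clusters (signals : List Bool) : Int :=
  (signals.foldl
    (fun (st : Int × Bool) signal =>
      if signal && !st.2 then (st.1 + 1, true)
      else if !signal then (st.1, false)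
      else st)
    (0, false)).1

-- ===== PORT B =====
-- groupby over the sequence: keys of maximal runs of consecutive equal values.
def pvGroupKeys : List Bool → List Bool
  | [] => []
  | x :: xs => x :: pvGroupKeys (xs.dropWhile (· == x))
termination_by l => l.length
decreasing_by
  simp only [List.length_cons]
  exact Nat.lt_succ_of_le (List.length_dropWhile_le _ _)

-- B: count the groups whose key is truthy.
def count_signal_clusters_alt (signals : List Bool) : Int :=
  (((pvGroupKeys signals).filter id).length : Int)

-- ===== PRECONDITION & SPEC =====
def Spec_count_signal_clusters (signals : List Bool) (out : Int) : Prop := out = count_signal_clusters_alt signals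
instance (signals : List Bool) (out : Int) : Decidable (Spec_count_signal_clusters signals out) := by unfold Spec_count_signal_clusters; infer_instance

-- ===== CLAIM (what is proved, stated in full; the proofs are below) =====
def Claim_equal_count_signal_clusters : Prop := ∀ (signals : List Bool), Dom_count_signal_clusters signals → Spec_count_signal_clusters signals (count_signal_clusters signals)

-- ===== LEMMAS AND PROOFS =====

-- proof-side count: number of cluster starts in l given the previous truth value
def pvG (prev : Bool) : List Bool → Nat
  | [] => 0
  | x :: xs => (if x && !prev then 1 else 0) + pvG x xs

lemma pvA_eq_pvG (l : List Bool) : ∀ (c : Int) (prev : Bool),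
    (l.foldl
      (fun (st : Int × Bool) signal =>
        if signal && !st.2 then (st.1 + 1, true)
        else if !signal then (st.1, false)
        else st)
      (c, prev)).1 = c + (pvG prev l : Int) := by
  induction l with
  | nil => intro c prev; simp [pvG]
  | cons x xs ih =>
    intro c prev
    have hstep :
        (fun (st : Int × Bool) signal =>
          if signal && !st.2 then (st.1 + 1, true)
          else if !signal then (st.1, false)
          else st) (c, prev) x
        = (c + (if x && !prev then 1 else 0), x) := by
      cases x <;> cases prev <;> simp
    simp only [List.foldl_cons, hstep, ih, pvG]
    cases x <;> cases prev <;> push_cast <;> ring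

lemma head?_dropWhile_ne (x : Bool) (xs : List Bool) :
    (xs.dropWhile (· == x)).head? ≠ some x := by
  induction xs with
  | nil => simp
  | cons y ys ih =>
    by_cases h : y = x
    · simpa [List.dropWhile, h] using ih
    · simp [List.dropWhile, Bool.beq_eq_decide_eq, h]

lemma pvG_head_irrel (x : Bool) (t : List Bool) (h : t.head? ≠ some x) :
    pvG x t = pvG false t := by
  cases t with
  | nil => rfl
  | cons y ys =>
    have hyx : y ≠ x := by intro he; exact h (by simp [he])
    cases y <;> cases x <;> simp_all [pvG]

lemma pvG_dropWhile (x : Bool) (xs : List Bool) :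
    pvG x xs = pvG x (xs.dropWhile (· == x)) := by
  induction xs with
  | nil => rfl
  | cons y ys ih =>
    by_cases h : y = x
    · subst h
      simpa [List.dropWhile, pvG] using ih
    · simp [List.dropWhile, Bool.beq_eq_decide_eq, h]

lemma pvGroupKeys_count (l : List Bool) :
    ((pvGroupKeys l).filter id).length = pvG false l := by
  induction l using pvGroupKeys.induct with
  | case1 => simp [pvGroupKeys, pvG]
  | case2 x xs ih =>
    rw [pvGroupKeys]
    have h1 : pvG x xs = pvG false (xs.dropWhile (· == x)) := by
      rw [pvG_dropWhile, pvG_head_irrel x _ (head?_dropWhile_ne x xs)]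
    have h2 : pvG false (x :: xs) = (if x = true then 1 else 0) + pvG false (xs.dropWhile (· == x)) := by
      cases x <;> simp [pvG, h1]
    rw [h2, ← ih]
    cases x <;> simp <;> omega

-- ===== VERDICT (by name: the statement is the Claim_ definition above) =====
theorem count_signal_clusters_spec : Claim_equal_count_signal_clusters := by
  intro signals _
  unfold Spec_count_signal_clusters count_signal_clusters count_signal_clusters_alt
  rw [pvA_eq_pvG signals 0 false, pvGroupKeys_count]
  simp
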